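-- pv_equiv track=rewrite | github.com/rekcilyssup/AssignmentCodes | q16.py | modify_first_middle_last
-- ===== SOURCE A (Python) =====
-- def modify_first_middle_last(input_list):
--     """
--     Accepts an list as a parameter
--     returns output
--
--     """
--
--     # Write your code
--     # Pattern: all first chars + all middle chars + all last chars
--     # For single char words: char is used as first, middle, AND last
--     first_chars = ""
--     middle_chars = ""
--     last_chars = ""
--
--     for word in input_list:
--         if len(word) == 0:
--             continue
--
--         # First character - always add for non-empty words
--         first_chars += word[0]
--
--         # Middle character
--         if len(word) == 1:
--             # For single char words, the char is also the middle
--             middle_chars += word[0]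
--         elif len(word) >= 2:
--             mid_index = len(word) // 2
--             middle_chars += word[mid_index]
--
--         # Last character
--         if len(word) == 1:
--             # For single char words, the char is also the last
--             last_chars += word[0]
--         elif len(word) == 2:
--             # For 2-char words, last char is the second char
--             last_chars += word[1]
--         else:
--             # For 3+ char words, last char is the actual last char
--             last_chars += word[-1]
--
--     return first_chars + middle_chars + last_chars
-- ===== SOURCE B (Python) =====
-- def _first(w):
--     return w[0]
--
-- def _mid(w):
--     return w[len(w) // 2]
--
-- def _last(w):
--     return w[-1]
--
-- def modify_first_middle_last(input_list):
--     # Output-driven: walk the 3n output positions, decode each position k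
--     # into a selector (k // n) and a word (k % n) by index arithmetic.
--     words = [w for w in input_list if w]
--     n = len(words)
--     chars = []
--     for k in range(3 * n):
--         w = words[k % n]
--         sel = k // n
--         if sel == 0:
--             chars.append(_first(w))
--         elif sel == 1:
--             chars.append(_mid(w))
--         else:
--             chars.append(_last(w))
--     return ''.join(chars)
-- ===== Notes on version B (the rewrite author's own statement) =====
-- stated objective: alternative
-- what changed: Instead of A's input-driven pass that grows three accumulator strings with per-length branches, B is output-driven: it walks the 3n output positions once and decodes each position k by index arithmetic (word k % n, selector k // n) into the one character that belongs there.
import Mathlib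
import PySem

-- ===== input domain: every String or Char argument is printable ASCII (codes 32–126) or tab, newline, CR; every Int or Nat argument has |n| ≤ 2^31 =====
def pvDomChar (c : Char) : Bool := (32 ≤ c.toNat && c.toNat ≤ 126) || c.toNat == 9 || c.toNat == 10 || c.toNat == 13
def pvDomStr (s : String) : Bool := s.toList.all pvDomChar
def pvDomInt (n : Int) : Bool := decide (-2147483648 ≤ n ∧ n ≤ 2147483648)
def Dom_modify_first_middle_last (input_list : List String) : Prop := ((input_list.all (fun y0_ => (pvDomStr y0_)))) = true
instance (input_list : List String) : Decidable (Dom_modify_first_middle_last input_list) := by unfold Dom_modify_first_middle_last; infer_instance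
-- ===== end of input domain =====

-- ===== PORT A =====
-- B replaces A's input-driven accumulator loop (per-length branches) by an
-- output-driven scan of the 3n output positions decoded by index arithmetic;
-- objective: alternative (same cost).
def pvStepA (st : List Char × List Char × List Char) (word : String) :
    List Char × List Char × List Char :=
  let w := word.toList
  if w.length = 0 then st
  else
    let f := st.1 ++ ((PySem.List.pyGet? w 0).getD ' ' :: [])
    let m :=
      if w.length = 1 then
        st.2.1 ++ ((PySem.List.pyGet? w 0).getD ' ' :: [])
      else
        st.2.1 ++ ((PySem.List.pyGet? w (PySem.Int.floordiv (w.length : Int) 2)).getD ' ' :: [])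
    let l :=
      if w.length = 1 then
        st.2.2 ++ ((PySem.List.pyGet? w 0).getD ' ' :: [])
      else if w.length = 2 then
        st.2.2 ++ ((PySem.List.pyGet? w 1).getD ' ' :: [])
      else
        st.2.2 ++ ((PySem.List.pyGet? w (-1)).getD ' ' :: [])
    (f, m, l)

def modify_first_middle_last (input_list : List String) : String :=
  let st := input_list.foldl pvStepA ([], [], [])
  String.ofList (st.1 ++ st.2.1 ++ st.2.2)

-- ===== PORT B =====
def pvFirst (w : String) : Char := (PySem.List.pyGet? w.toList 0).getD ' '
def pvMid (w : String) : Char :=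
  (PySem.List.pyGet? w.toList (PySem.Int.floordiv (w.toList.length : Int) 2)).getD ' '
def pvLast (w : String) : Char := (PySem.List.pyGet? w.toList (-1)).getD ' '

-- decode output position k: word k % n, selector k // n
def pvSelAt (words : List String) (n : Nat) (k : Int) : Char :=
  let w := (PySem.List.pyGet? words (PySem.Int.mod k (n : Int))).getD ""
  let sel := PySem.Int.floordiv k (n : Int)
  if sel = 0 then pvFirst w
  else if sel = 1 then pvMid w
  else pvLast w

def modify_first_middle_last_alt (input_list : List String) : String :=
  let words := input_list.filter (fun w => w.toList ≠ [])
  let n := words.length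
  String.ofList ((PySem.List.pyRange 0 (3 * (n : Int)) 1).map (pvSelAt words n))

-- ===== PRECONDITION & SPEC =====
def Spec_modify_first_middle_last (input_list : List String) (out : String) : Prop := out = modify_first_middle_last_alt input_list
instance (input_list : List String) (out : String) : Decidable (Spec_modify_first_middle_last input_list out) := by unfold Spec_modify_first_middle_last; infer_instance

-- ===== CLAIM (what is proved, stated in full; the proofs are below) =====
def Claim_equal_modify_first_middle_last : Prop := ∀ (input_list : List String), Dom_modify_first_middle_last input_list → Spec_modify_first_middle_last input_list (modify_first_middle_last input_list)

-- ===== LEMMAS AND PROOFS =====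

-- A's fold builds the three per-selector strings of the non-empty words.
lemma pvFoldA (xs : List String) (f m l : List Char) :
    xs.foldl pvStepA (f, m, l) =
      (f ++ ((xs.filter (fun w => w.toList ≠ [])).map pvFirst),
       m ++ ((xs.filter (fun w => w.toList ≠ [])).map pvMid),
       l ++ ((xs.filter (fun w => w.toList ≠ [])).map pvLast)) := by
  induction xs generalizing f m l with
  | nil => simp
  | cons w xs ih =>
    match hw : w.toList with
    | [] =>
      have hne : w = "" := by
        have := congrArg String.ofList hw; simpa using this
      simp [List.foldl, pvStepA, ih, hne]
    | [c] =>
      have hne : w ≠ "" := by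
        intro h; rw [h] at hw; simp at hw
      simp [List.foldl, pvStepA, hw, ih, hne, pvFirst, pvMid, pvLast,
        PySem.List.pyGet?, PySem.List.pyIdx?, PySem.Int.floordiv]
    | [c, d] =>
      have hne : w ≠ "" := by
        intro h; rw [h] at hw; simp at hw
      simp [List.foldl, pvStepA, hw, ih, hne, pvFirst, pvMid, pvLast,
        PySem.List.pyGet?, PySem.List.pyIdx?, PySem.Int.floordiv]
    | c :: d :: e :: rest =>
      have hne : w ≠ "" := by
        intro h; rw [h] at hw; simp at hw
      simp [List.foldl, pvStepA, hw, ih, hne, pvFirst, pvMid, pvLast]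

-- one third of B's output-position scan is one selector mapped over the words
lemma pvSeg (words : List String) (n j : Nat) (hn : words.length = n)
    (a b : Int) (ha : a = (j : Int) * n) (hb : b = a + n)
    (f : String → Char)
    (hf : ∀ (i : Nat) (h : i < words.length),
        pvSelAt words n ((j : Int) * n + i) = f words[i]) :
    (PySem.List.pyRange a b 1).map (pvSelAt words n) = words.map f := by
  subst ha hb
  apply List.ext_getElem
  · rw [List.length_map, List.length_map, PySem.List.length_pyRange_one,
      show ((j : Int) * n + n - (j : Int) * n) = (n : Int) by ring, Int.toNat_natCast, hn]
  · intro i h1 h2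
    rw [List.length_map, PySem.List.length_pyRange_one,
      show ((j : Int) * n + n - (j : Int) * n) = (n : Int) by ring, Int.toNat_natCast] at h1
    have hi' : i < words.length := by omega
    rw [List.getElem_map, List.getElem_map, PySem.List.getElem_pyRange_one, hf i hi']

-- decoding position j*n + i (0 ≤ i < n) yields selector j and word i
lemma pvSelAt_decode (words : List String) (n j : Nat) (hn : words.length = n)
    (hj : j < 3) (i : Nat) (hi : i < n) :
    pvSelAt words n ((j : Int) * n + i) =
      (if j = 0 then pvFirst words[i]! else if j = 1 then pvMid words[i]! else pvLast words[i]!) := by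
  have hnpos : (0 : Int) < (n : Int) := by exact_mod_cast Nat.zero_lt_of_lt hi
  have hmod : PySem.Int.mod ((j : Int) * n + i) (n : Int) = (i : Int) := by
    rw [PySem.Int.mod_eq_emod_of_pos hnpos]
    rw [show (j : Int) * n + i = (i : Int) + (n : Int) * (j : Int) by ring]
    rw [Int.add_mul_emod_self_left]
    exact Int.emod_eq_of_lt (by positivity) (by exact_mod_cast hi)
  have hdiv : PySem.Int.floordiv ((j : Int) * n + i) (n : Int) = (j : Int) := by
    rw [PySem.Int.floordiv_eq_ediv_of_pos hnpos]
    rw [show (j : Int) * n + i = (i : Int) + (j : Int) * (n : Int) by ring]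
    rw [Int.add_mul_ediv_right _ _ (by omega : (n : Int) ≠ 0)]
    rw [Int.ediv_eq_zero_of_lt (by positivity) (by exact_mod_cast hi)]
    ring
  have hget : (PySem.List.pyGet? words ((i : Nat) : Int)).getD "" = words[i]! := by
    rw [PySem.List.pyGet?_natCast]
    have hi' : i < words.length := by omega
    simp [List.getElem!_eq_getElem?_getD, List.getElem?_eq_getElem hi']
  unfold pvSelAt
  rw [hmod, hdiv, hget]
  interval_cases j <;> simp

-- ===== VERDICT (by name: the statement is the Claim_ definition above) =====
theorem modify_first_middle_last_spec : Claim_equal_modify_first_middle_last := by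
  intro xs _
  unfold Spec_modify_first_middle_last modify_first_middle_last modify_first_middle_last_alt
  rw [pvFoldA]
  dsimp only
  apply congrArg
  generalize List.filter (fun w => decide (w.toList ≠ [])) xs = words
  have h01 : (0 : Int) ≤ (words.length : Int) := by positivity
  symm
  rw [PySem.List.pyRange_one_append 0 (2 * (words.length : Int)) (3 * words.length)
      (by omega) (by omega),
    PySem.List.pyRange_one_append 0 (words.length : Int) (2 * words.length)
      (by omega) (by omega),
    List.map_append, List.map_append]
  congr 1
  congr 1
  · apply pvSeg words words.length 0 rfl 0 (words.length : Int) (by norm_num) (by norm_num)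
    intro i h
    rw [pvSelAt_decode words words.length 0 rfl (by omega) i (by omega)]
    simp [List.getElem!_eq_getElem?_getD, List.getElem?_eq_getElem h]
  · apply pvSeg words words.length 1 rfl (words.length : Int) (2 * words.length)
      (by norm_num) (by ring)
    intro i h
    rw [pvSelAt_decode words words.length 1 rfl (by omega) i (by omega)]
    simp [List.getElem!_eq_getElem?_getD, List.getElem?_eq_getElem h]
  · apply pvSeg words words.length 2 rfl (2 * (words.length : Int)) (3 * words.length)
      (by norm_num) (by ring)
    intro i h
    rw [pvSelAt_decode words words.length 2 rfl (by omega) i (by omega)]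
    simp [List.getElem!_eq_getElem?_getD, List.getElem?_eq_getElem h]
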